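-- pv_equiv track=rewrite | github.com/GeorgiyDemo/FA | Course I/Практика Python/Part1/pract2/task2/system_of_equations_solver.py | compilator
-- ===== SOURCE A (Python) =====
-- digit = '1234567890.'
--
-- def compilator(listt):
--     for primer in range(len(listt)):
--         left = True
--         res = ''
--         for i in range(len(listt[primer])):
--             if listt[primer][i] == '=':
--                 left = False
--                 middle = i
--             if not left:
--                 if listt[primer][i] in digit and listt[primer][middle + 1:i].replace(' ', '') == '':
--                     res += '-' + listt[primer][i]
--                 elif listt[primer][i] == '+':
--                     res += '-'
--                 elif listt[primer][i] == '-':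
--                     res += '+'
--                 elif listt[primer][i] == '=':
--                     pass
--                 else:
--                     res += listt[primer][i]
--             else:
--                 res += listt[primer][i]
--         listt[primer] = res
--     for primer in range(len(listt)):
--         listt[primer] = listt[primer].replace(' 0 ', '')
--         listt[primer] = listt[primer].replace(' ', '')
--     return listt
-- ===== SOURCE B (Python) =====
-- digit = '1234567890.'
--
--
-- def _move(seg):
--     # swap '+' <-> '-' in a segment that sat right of an '='
--     seg = ''.join('-' if c == '+' else '+' if c == '-' else c for c in seg)
--     stripped = seg.lstrip(' ')
--     if stripped and stripped[0] in digit: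
--         # a number led the segment: negate it
--         return seg[:len(seg) - len(stripped)] + '-' + stripped
--     return seg
--
--
-- def compilator(listt):
--     for k in range(len(listt)):
--         parts = listt[k].split('=')
--         res = parts[0] + ''.join(_move(seg) for seg in parts[1:])
--         listt[k] = res.replace(' 0 ', '').replace(' ', '')
--     return listt
-- ===== Notes on version B (the rewrite author's own statement) =====
-- stated objective: alternative
-- what changed: A scans each string char-by-char with a left/middle index state machine, re-slicing back to the last '=' to detect a leading number; B instead splits each string on '=' once, keeps the first part, and rewrites each remaining segment wholesale (swap '+'/'-', then insert one '-' before a segment-leading number).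
import Mathlib
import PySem

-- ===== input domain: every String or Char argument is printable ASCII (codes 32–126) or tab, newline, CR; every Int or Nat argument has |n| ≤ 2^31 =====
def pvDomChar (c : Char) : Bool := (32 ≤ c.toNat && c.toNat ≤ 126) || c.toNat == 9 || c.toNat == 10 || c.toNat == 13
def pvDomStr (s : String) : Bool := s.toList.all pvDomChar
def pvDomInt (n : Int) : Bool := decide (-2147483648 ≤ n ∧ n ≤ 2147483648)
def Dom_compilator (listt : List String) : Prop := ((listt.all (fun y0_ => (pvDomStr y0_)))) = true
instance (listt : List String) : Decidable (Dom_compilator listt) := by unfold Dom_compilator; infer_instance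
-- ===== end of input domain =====

-- B re-decomposes A's indexed char scan as split-on-'=' + per-segment sign swap (same return values;
-- both A and B mutate the argument list in place in Python — the equivalence proved here is about the return value).

-- ===== PORT A =====
-- the module constant digit = '1234567890.'
def digitChars : List Char := ['1','2','3','4','5','6','7','8','9','0','.']

-- one iteration of A's inner 'for i in range(len(listt[primer]))' loop; state = (left, middle, res).
-- Python's '.replace(' ', '') == ''' on the slice is ported as 'filter (· ≠ ' ') = []' (removing every
-- space and comparing with '' is exactly dropping the spaces); Python's uninitialised 'middle' is 0 here,
-- it is only read after left has become False, by which time middle has been assigned.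
def aStep (cs : List Char) (st : Bool × Int × List Char) (i : Int) : Bool × Int × List Char :=
  let c := PySem.List.pyGetD cs i ' '
  let middle := if c = '=' then i else st.2.1
  let left := if c = '=' then false else st.1
  let res := st.2.2
  if left = false then
    if c ∈ digitChars ∧ (PySem.List.slice cs (some (middle + 1)) (some i)).filter (fun x => x ≠ ' ') = [] then
      (left, middle, res ++ ['-', c])
    else if c = '+' then (left, middle, res ++ ['-'])
    else if c = '-' then (left, middle, res ++ ['+'])
    else if c = '=' then (left, middle, res)
    else (left, middle, res ++ [c])
  else (left, middle, res ++ [c])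

-- A's first loop body for one string
def aLine (cs : List Char) : List Char :=
  ((PySem.List.pyRange 0 (cs.length : Int) 1).foldl (aStep cs) (true, 0, [])).2.2

def compilator (listt : List String) : List String :=
  -- first loop: rewrite every equation
  let l1 := listt.map (fun s => String.ofList (aLine s.toList))
  -- second loop: listt[primer].replace(' 0 ', '') then .replace(' ', '')
  l1.map (fun s => PySem.Str.replace (PySem.Str.replace s " 0 " "") " " "")

-- ===== PORT B =====
def swapChar (c : Char) : Char := if c = '+' then '-' else if c = '-' then '+' else c

-- B's _move: swap signs in a right-hand segment; if (after the swap) the first non-space char is a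
-- digit, insert '-' in front of it.  seg.lstrip(' ') is ported as dropWhile (· = ' ') (exact: lstrip
-- with an explicit ' ' argument removes leading spaces only), the kept prefix as takeWhile (· = ' ').
def bSeg (seg : List Char) : List Char :=
  let sw := seg.map swapChar
  match sw.dropWhile (· = ' ') with
  | [] => sw
  | c :: rest =>
      if c ∈ digitChars then sw.takeWhile (· = ' ') ++ '-' :: c :: rest else sw

-- parts[0] + ''.join(_move(seg) for seg in parts[1:]); s.split('=') with a one-char separator
-- is List.splitOn '=' (exact for a non-empty single-character separator)
def bLine (cs : List Char) : List Char :=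
  match List.splitOn '=' cs with
  | [] => []   -- unreachable: split never returns an empty list
  | p :: rest => p ++ (rest.map bSeg).flatten

def compilator_alt (listt : List String) : List String :=
  listt.map (fun s =>
    PySem.Str.replace (PySem.Str.replace (String.ofList (bLine s.toList)) " 0 " "") " " "")

-- ===== PRECONDITION & SPEC =====
def Spec_compilator (listt : List String) (out : List String) : Prop := out = compilator_alt listt
instance (listt : List String) (out : List String) : Decidable (Spec_compilator listt out) := by unfold Spec_compilator; infer_instance

-- ===== CLAIM (what is proved, stated in full; the proofs are below) =====
def Claim_equal_compilator : Prop := ∀ (listt : List String), Dom_compilator listt → Spec_compilator listt (compilator listt)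

-- ===== LEMMAS AND PROOFS =====

-- reference form of A's scan right of the first '=': sp = "every char since the last '=' is a space"
def procR : List Char → Bool → List Char
  | [], _ => []
  | c :: t, sp =>
    if c = '=' then procR t true
    else if c ∈ digitChars ∧ sp = true then '-' :: c :: procR t false
    else if c = '+' then '-' :: procR t false
    else if c = '-' then '+' :: procR t false
    else c :: procR t (sp && c = ' ')

-- reference form of A's scan: copy until the first '=', then procR
def procL : List Char → List Char
  | [] => []
  | c :: t => if c = '=' then procR t true else c :: procL t

lemma pyRange_one_nil {a b : Int} (h : b ≤ a) : PySem.List.pyRange a b 1 = [] := by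
  simp [PySem.List.pyRange]; omega

lemma drop_cons_get {cs t : List Char} {k : Nat} {c : Char} (h : cs.drop k = c :: t) :
    cs[k]? = some c := by
  have := (List.getElem?_drop (xs := cs) (i := k) (j := 0)).symm
  simp [h] at this; simpa using this

lemma drop_cons_drop {cs t : List Char} {k : Nat} {c : Char} (h : cs.drop k = c :: t) :
    cs.drop (k + 1) = t := by
  have : cs.drop (k + 1) = (cs.drop k).drop 1 := by
    rw [List.drop_drop]
  simp [this, h]

lemma drop_cons_lt {cs t : List Char} {k : Nat} {c : Char} (h : cs.drop k = c :: t) :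
    k < cs.length := by
  by_contra hk
  rw [List.drop_eq_nil_iff.mpr (Nat.le_of_not_lt hk)] at h
  cases h

lemma slice_empty (cs : List Char) (k : Nat) :
    PySem.List.slice cs (some ((k : Int) + 1)) (some ((k : Int) + 1)) = [] := by
  have h : ((k : Int) + 1) = (((k + 1 : Nat)) : Int) := by push_cast; ring
  rw [h, PySem.List.slice_natCast]
  simp

lemma slice_snoc {cs t : List Char} {k : Nat} {c : Char} (m : Nat)
    (hmk : m + 1 ≤ k) (ht : cs.drop k = c :: t) :
    PySem.List.slice cs (some ((m : Int) + 1)) (some ((k : Int) + 1))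
      = PySem.List.slice cs (some ((m : Int) + 1)) (some ((k : Int))) ++ [c] := by
  have h1 : ((m : Int) + 1) = (((m + 1 : Nat)) : Int) := by push_cast; ring
  have h2 : ((k : Int) + 1) = (((k + 1 : Nat)) : Int) := by push_cast; ring
  rw [h1, h2, PySem.List.slice_natCast, PySem.List.slice_natCast]
  have hget : (cs.drop (m + 1))[k - (m + 1)]? = some c := by
    rw [List.getElem?_drop]
    have he : (m + 1) + (k - (m + 1)) = k := by omega
    rw [he]
    exact drop_cons_get ht
  have hs : k + 1 - (m + 1) = (k - (m + 1)) + 1 := by omega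
  rw [hs, List.take_add_one, hget]
  simp

lemma char_facts_digit {c : Char} (h : c ∈ digitChars) :
    c ≠ '=' ∧ c ≠ '+' ∧ c ≠ '-' ∧ c ≠ ' ' := by
  fin_cases h <;> refine ⟨by decide, by decide, by decide, by decide⟩

lemma A_loopR (cs : List Char) : ∀ (t : List Char) (k m : Nat) (res : List Char) (sp : Bool),
    cs.drop k = t → m + 1 ≤ k →
    ((∀ x ∈ PySem.List.slice cs (some ((m : Int) + 1)) (some (k : Int)), x = ' ') ↔ sp = true) →
    ((PySem.List.pyRange (k : Int) (cs.length : Int) 1).foldl (aStep cs) (false, (m : Int), res)).2.2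
      = res ++ procR t sp := by
  intro t
  induction t with
  | nil =>
    intro k m res sp h1 _ _
    have hk : cs.length ≤ k := List.drop_eq_nil_iff.mp h1
    rw [pyRange_one_nil (by exact_mod_cast hk)]
    simp [procR]
  | cons c t ih =>
    intro k m res sp h1 h2 h3
    have hk : k < cs.length := drop_cons_lt h1
    have hc : cs[k]? = some c := drop_cons_get h1
    have hd : cs.drop (k + 1) = t := drop_cons_drop h1
    have hcast : (k : Int) + 1 = ((k + 1 : Nat) : Int) := by push_cast; ring
    rw [PySem.List.pyRange_one_cons (by exact_mod_cast hk), List.foldl_cons]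
    by_cases hce : c = '='
    · have hnd : '=' ∉ digitChars := by decide
      have hstep : aStep cs (false, (m : Int), res) (k : Int) = (false, (k : Int), res) := by
        simp [aStep, hc, hce, hnd]
      rw [hstep, hcast,
        ih (k + 1) k res true hd (by omega) (by rw [← hcast, slice_empty]; simp)]
      simp [procR, hce]
    · by_cases hdig : c ∈ digitChars
      · obtain ⟨_, hp, hm, hspace⟩ := char_facts_digit hdig
        by_cases hsp : sp = true
        · have hcond : ∀ x ∈ PySem.List.slice cs (some ((m : Int) + 1)) (some (k : Int)), x = ' ' :=
            h3.mpr hsp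
          have hstep : aStep cs (false, (m : Int), res) (k : Int) = (false, (m : Int), res ++ ['-', c]) := by
            simp [aStep, hc, hce, hdig]
            intro x hx hxs
            exact absurd (hcond x hx) hxs
          rw [hstep, hcast,
            ih (k + 1) m (res ++ ['-', c]) false hd (by omega)
              (by rw [← hcast, slice_snoc m h2 h1]; simp; exact ⟨c, Or.inr rfl, hspace⟩)]
          simp [procR, hce, hdig, hsp]
        · have hcond : ¬ ∀ x ∈ PySem.List.slice cs (some ((m : Int) + 1)) (some (k : Int)), x = ' ' := by
            intro hx; exact hsp (h3.mp hx)
          have hstep : aStep cs (false, (m : Int), res) (k : Int) = (false, (m : Int), res ++ [c]) := by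
            simp [aStep, hc, hce, hcond, hp, hm]
          rw [hstep, hcast,
            ih (k + 1) m (res ++ [c]) false hd (by omega) ?_]
          · simp [procR, hce, hdig, hsp, hp, hm]
          · rw [← hcast, slice_snoc m h2 h1]
            simp
            by_contra hno
            exact absurd
              (fun x hx => Classical.byContradiction (fun hxs => hno ⟨x, Or.inl hx, hxs⟩))
              hcond
      · by_cases hp : c = '+'
        · subst hp
          have hstep : aStep cs (false, (m : Int), res) (k : Int) = (false, (m : Int), res ++ ['-']) := by
            simp [aStep, hc, show ('+' ∈ digitChars) = False from by decide]
          rw [hstep, hcast,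
            ih (k + 1) m (res ++ ['-']) false hd (by omega)
              (by rw [← hcast, slice_snoc m h2 h1]; simp; exact ⟨'+', Or.inr rfl, by decide⟩)]
          simp [procR, show ('+' ∈ digitChars) = False from by decide]
        · by_cases hm : c = '-'
          · subst hm
            have hstep : aStep cs (false, (m : Int), res) (k : Int) = (false, (m : Int), res ++ ['+']) := by
              simp [aStep, hc, show ('-' ∈ digitChars) = False from by decide]
            rw [hstep, hcast,
              ih (k + 1) m (res ++ ['+']) false hd (by omega)
                (by rw [← hcast, slice_snoc m h2 h1]; simp; exact ⟨'-', Or.inr rfl, by decide⟩)]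
            simp [procR, show ('-' ∈ digitChars) = False from by decide]
          · have hstep : aStep cs (false, (m : Int), res) (k : Int) = (false, (m : Int), res ++ [c]) := by
              simp [aStep, hc, hce, hdig, hp, hm]
            rw [hstep, hcast,
              ih (k + 1) m (res ++ [c]) (sp && decide (c = ' ')) hd (by omega) ?_]
            · simp [procR, hce, hdig, hp, hm]
            · rw [← hcast, slice_snoc m h2 h1]
              by_cases hsp2 : c = ' '
              · subst hsp2
                simp
                constructor
                · intro hall; exact h3.mp (fun x hx => hall x (Or.inl hx))
                · intro hspt x hx
                  rcases hx with hx | hx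
                  · exact h3.mpr hspt x hx
                  · exact hx
              · simp [hsp2]
                exact ⟨c, Or.inr rfl, hsp2⟩

lemma A_loopL (cs : List Char) : ∀ (t : List Char) (k : Nat) (m0 : Int) (res : List Char),
    cs.drop k = t →
    ((PySem.List.pyRange (k : Int) (cs.length : Int) 1).foldl (aStep cs) (true, m0, res)).2.2
      = res ++ procL t := by
  intro t
  induction t with
  | nil =>
    intro k m0 res h1
    have hk : cs.length ≤ k := List.drop_eq_nil_iff.mp h1
    rw [pyRange_one_nil (by exact_mod_cast hk)]
    simp [procL]
  | cons c t ih =>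
    intro k m0 res h1
    have hk : k < cs.length := drop_cons_lt h1
    have hc : cs[k]? = some c := drop_cons_get h1
    have hd : cs.drop (k + 1) = t := drop_cons_drop h1
    have hcast : (k : Int) + 1 = ((k + 1 : Nat) : Int) := by push_cast; ring
    rw [PySem.List.pyRange_one_cons (by exact_mod_cast hk), List.foldl_cons]
    by_cases hce : c = '='
    · have hnd : '=' ∉ digitChars := by decide
      have hstep : aStep cs (true, m0, res) (k : Int) = (false, (k : Int), res) := by
        simp [aStep, hc, hce, hnd]
      rw [hstep, hcast,
        A_loopR cs t (k + 1) k res true hd (by omega) (by rw [← hcast, slice_empty]; simp)]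
      simp [procL, hce]
    · have hstep : aStep cs (true, m0, res) (k : Int) = (true, m0, res ++ [c]) := by
        simp [aStep, hc, hce]
      rw [hstep, hcast, ih (k + 1) m0 (res ++ [c]) hd]
      simp [procL, hce]

lemma aLine_eq (cs : List Char) : aLine cs = procL cs := by
  have h := A_loopL cs cs 0 0 [] (by simp)
  simpa [aLine] using h

lemma swapChar_space : swapChar ' ' = ' ' := by decide

lemma swapChar_of_digit {c : Char} (h : c ∈ digitChars) : swapChar c = c := by
  fin_cases h <;> decide

lemma bSeg_cons_space (seg : List Char) : bSeg (' ' :: seg) = ' ' :: bSeg seg := by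
  simp only [bSeg, List.map_cons, swapChar_space, List.dropWhile_cons, List.takeWhile_cons,
    decide_true, if_true]
  cases hd : (seg.map swapChar).dropWhile (fun c => decide (c = ' ')) with
  | nil => simp
  | cons c rest => by_cases hdig : c ∈ digitChars <;> simp [hdig]

lemma bSeg_cons_nonspace {c : Char} (seg : List Char) (hs : swapChar c ≠ ' ') :
    bSeg (c :: seg) = if swapChar c ∈ digitChars
      then '-' :: swapChar c :: seg.map swapChar
      else swapChar c :: seg.map swapChar := by
  simp only [bSeg, List.map_cons, List.dropWhile_cons, List.takeWhile_cons, hs, decide_false]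
  by_cases hdig : swapChar c ∈ digitChars <;> simp [hdig]

lemma splitOn_eq_cons_ne {c : Char} (t : List Char) (hce : c ≠ '=') :
    List.splitOn '=' (c :: t)
      = (c :: (List.splitOn '=' t).headI) :: (List.splitOn '=' t).tail := by
  obtain ⟨h, tl, hst⟩ := List.exists_cons_of_ne_nil (List.splitOnP_ne_nil (· == '=') t)
  simp only [List.splitOn] at hst ⊢
  rw [List.splitOnP_cons, hst]
  simp [hce]

lemma splitOn_eq_cons_eq (t : List Char) :
    List.splitOn '=' ('=' :: t) = [] :: List.splitOn '=' t := by
  simp only [List.splitOn]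
  rw [List.splitOnP_cons]
  simp

lemma R_main (cs : List Char) : ∀ (sp : Bool),
    procR cs sp = (if sp then bSeg ((List.splitOn '=' cs).headI)
                   else ((List.splitOn '=' cs).headI).map swapChar)
                  ++ (((List.splitOn '=' cs).tail).map bSeg).flatten := by
  induction cs with
  | nil =>
    intro sp
    cases sp <;> simp [procR, List.splitOn, List.splitOnP_nil, bSeg]
  | cons c t ih =>
    intro sp
    by_cases hce : c = '='
    · subst hce
      rw [splitOn_eq_cons_eq]
      obtain ⟨h, tl, hst⟩ := List.exists_cons_of_ne_nil
        (show List.splitOn '=' t ≠ [] from List.splitOnP_ne_nil _ t)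
      have hR := ih true
      rw [hst] at hR
      simp only [List.headI, List.tail] at hR
      cases sp <;>
        simp [procR, hst, bSeg, hR]
    · obtain ⟨h, tl, hst⟩ := List.exists_cons_of_ne_nil
        (show List.splitOn '=' t ≠ [] from List.splitOnP_ne_nil _ t)
      rw [splitOn_eq_cons_ne t hce, hst]
      simp only [List.headI, List.tail]
      have ihT := ih true
      have ihF := ih false
      rw [hst] at ihT ihF
      simp only [List.headI, List.tail, if_true, if_false, Bool.false_eq_true] at ihT ihF
      by_cases hsp : sp = true
      · subst hsp
        rw [if_pos rfl]
        by_cases hspace : c = ' '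
        · subst hspace
          rw [show procR (' ' :: t) true = ' ' :: procR t true by
              simp [procR, show (' ' ∈ digitChars) = False from by decide]]
          rw [ihT, bSeg_cons_space]
          simp
        · by_cases hdig : c ∈ digitChars
          · rw [show procR (c :: t) true = '-' :: c :: procR t false by
                simp [procR, hce, hdig]]
            rw [ihF, bSeg_cons_nonspace _ (by rw [swapChar_of_digit hdig]; exact hspace),
              swapChar_of_digit hdig]
            simp [hdig]
          · have hswnd : swapChar c ∉ digitChars := by
              unfold swapChar
              split_ifs
              · decide
              · decide
              · exact hdig
            have hswns : swapChar c ≠ ' ' := by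
              unfold swapChar
              split_ifs
              · decide
              · decide
              · exact hspace
            rw [show procR (c :: t) true = swapChar c :: procR t false by
                by_cases hp : c = '+'
                · subst hp
                  simp [procR, swapChar, show ('+' ∈ digitChars) = False from by decide]
                · by_cases hm : c = '-'
                  · subst hm
                    simp [procR, swapChar, show ('-' ∈ digitChars) = False from by decide]
                  · simp [procR, hce, hdig, hp, hm, swapChar, hspace]]
            rw [ihF, bSeg_cons_nonspace _ hswns]
            simp [hswnd]
      · have hspf : sp = false := by
          cases sp
          · rfl
          · exact absurd rfl hsp
        subst hspf
        rw [if_neg (by simp)]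
        rw [show procR (c :: t) false = swapChar c :: procR t false by
            by_cases hp : c = '+'
            · subst hp
              simp [procR, swapChar]
            · by_cases hm : c = '-'
              · subst hm
                simp [procR, swapChar]
              · simp [procR, hce, hp, hm, swapChar]]
        rw [ihF]
        simp

lemma bLine_eq (cs : List Char) : bLine cs = procL cs := by
  induction cs with
  | nil => rfl
  | cons c t ih =>
    by_cases hce : c = '='
    · subst hce
      obtain ⟨h, tl, hst⟩ := List.exists_cons_of_ne_nil
        (show List.splitOn '=' t ≠ [] from List.splitOnP_ne_nil _ t)
      have hR := R_main t true
      rw [hst] at hR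
      simp only [List.headI, List.tail, if_true] at hR
      simp only [bLine, splitOn_eq_cons_eq, hst, procL]
      simp [hR]
    · obtain ⟨h, tl, hst⟩ := List.exists_cons_of_ne_nil
        (show List.splitOn '=' t ≠ [] from List.splitOnP_ne_nil _ t)
      have hb : bLine t = h ++ (tl.map bSeg).flatten := by
        simp [bLine, hst]
      simp only [bLine, splitOn_eq_cons_ne t hce, hst, List.headI, List.tail, procL, hce,
        if_false]
      rw [← ih, hb]
      simp

lemma line_eq (cs : List Char) : aLine cs = bLine cs := by
  rw [aLine_eq, bLine_eq]

-- ===== VERDICT (by name: the statement is the Claim_ definition above) =====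
theorem compilator_spec : Claim_equal_compilator := by
  unfold Claim_equal_compilator
  intro listt _
  unfold Spec_compilator compilator compilator_alt
  simp only [List.map_map]
  apply List.map_congr_left
  intro s _
  simp [Function.comp, line_eq]
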